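-- pv_equiv track=rewrite | github.com/jclark-tun77976/Road-Trip-Planner-AI-Webapp | backend/app/services/mapping_services.py | _dedupe_consecutive_locations
-- ===== SOURCE A (Python) =====
-- def _dedupe_consecutive_locations(route_inputs: list[dict[str, str]]) -> list[dict[str, str]]:
--     deduped: list[dict[str, str]] = []
--
--     for route_input in route_inputs:
--         if deduped and _normalize_comparable_location(deduped[-1]["location"]) == _normalize_comparable_location(route_input["location"]):
--             if route_input["kind"] == "destination":
--                 deduped[-1]["kind"] = "destination"
--                 deduped[-1]["name"] = route_input["name"]
--             continue
--         deduped.append(route_input)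
--
--     return deduped
--
-- def _normalize_location(location: str) -> str:
--     return " ".join(location.lower().split())
--
-- def _normalize_comparable_location(location: str) -> str:
--     normalized = _normalize_location(location)
--     normalized = normalized.replace("united states", "").replace("usa", "")
--     normalized = "".join(character if character.isalnum() or character.isspace() else " " for character in normalized)
--     normalized = " ".join(part for part in normalized.split() if not part.isdigit() or len(part) != 5)
--     return " ".join(normalized.split())
-- ===== SOURCE B (Python) =====
-- def _normalize_location(location: str) -> str:
--     return " ".join(location.lower().split())
--
-- def _normalize_comparable_location(location: str) -> str:
--     normalized = _normalize_location(location)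
--     normalized = normalized.replace("united states", "").replace("usa", "")
--     normalized = "".join(character if character.isalnum() or character.isspace() else " " for character in normalized)
--     normalized = " ".join(part for part in normalized.split() if not part.isdigit() or len(part) != 5)
--     return " ".join(normalized.split())
--
-- def _dedupe_consecutive_locations(route_inputs: list[dict[str, str]]) -> list[dict[str, str]]:
--     # Nothing to deduplicate for fewer than two entries.
--     if len(route_inputs) < 2:
--         return route_inputs
--     # Stage 1: partition the list into runs of consecutive entries that share a
--     # normalized location key (a groupby over the normalized key).
--     groups: list[tuple[str, list[dict[str, str]]]] = []
--     for route_input in route_inputs: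
--         key = _normalize_comparable_location(route_input["location"])
--         if groups and groups[-1][0] == key:
--             groups[-1][1].append(route_input)
--         else:
--             groups.append((key, [route_input]))
--     # Stage 2: collapse each run onto its first entry; if any later member of the
--     # run is a destination, the kept entry becomes a destination carrying the
--     # name of the run's last destination.
--     result: list[dict[str, str]] = []
--     for _, run in groups:
--         kept = run[0]
--         last_destination_name = None
--         for extra in run[1:]:
--             if extra["kind"] == "destination":
--                 last_destination_name = extra["name"]
--         if last_destination_name is not None:
--             kept["kind"] = "destination"
--             kept["name"] = last_destination_name
--         result.append(kept)
--     return result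
-- ===== Notes on version B (the rewrite author's own statement) =====
-- stated objective: alternative
-- what changed: B replaces A's single pass that merges each duplicate into the last kept dict as it goes by a two-stage groupby: first partition the list into runs of consecutive entries with equal normalized keys, then collapse each run onto its first entry, applying the run's last destination (if any) once.
import Mathlib
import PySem

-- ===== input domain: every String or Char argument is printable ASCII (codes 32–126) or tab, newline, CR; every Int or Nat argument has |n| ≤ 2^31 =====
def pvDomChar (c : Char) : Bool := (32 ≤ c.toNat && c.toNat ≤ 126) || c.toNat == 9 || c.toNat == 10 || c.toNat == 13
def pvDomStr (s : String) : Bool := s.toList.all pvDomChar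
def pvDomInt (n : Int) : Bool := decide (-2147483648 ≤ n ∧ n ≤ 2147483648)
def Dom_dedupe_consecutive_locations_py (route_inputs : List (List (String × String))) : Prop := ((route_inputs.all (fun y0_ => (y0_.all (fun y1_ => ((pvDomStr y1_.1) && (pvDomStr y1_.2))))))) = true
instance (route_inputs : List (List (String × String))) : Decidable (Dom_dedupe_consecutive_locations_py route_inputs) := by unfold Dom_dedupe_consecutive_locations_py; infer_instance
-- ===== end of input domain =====

-- B replaces A's single pass (merge each duplicate into the last kept dict as you go) by a
-- two-stage groupby: partition into runs of consecutive entries with equal normalized keys,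
-- then collapse each run onto its first entry, applying the run's last destination once.
-- Equivalence is about the RETURN value; both Pythons mutate the kept dicts of the input.

-- ===== shared module helpers (used by both Pythons) =====
-- dict lookup d[k] on the association list; the "" default is never read under Pre_
def pvDGet (d : List (String × String)) (k : String) : String :=
  (PySem.Dict.mk d).getD k ""

-- dict assignment d[k] = v (overwrite keeps the key's position, as Python does)
def pvDSet (d : List (String × String)) (k v : String) : List (String × String) :=
  ((PySem.Dict.mk d).insert k v).items

-- _normalize_location
def pvNormalizeLocation (location : String) : String :=
  PySem.Str.join " " (PySem.Str.split₀ (PySem.Str.lower location))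

-- _normalize_comparable_location
def pvNormKey (location : String) : String :=
  let n1 := pvNormalizeLocation location
  let n2 := PySem.Str.replace (PySem.Str.replace n1 "united states" "") "usa" ""
  let n3 := String.ofList (n2.toList.map (fun c =>
              if PySem.Chars.isalnum c || PySem.Chars.isspace c then c else ' '))
  let n4 := PySem.Str.join " "
              ((PySem.Str.split₀ n3).filter (fun p =>
                 !(PySem.Str.strIsdigit p) || PySem.Str.len p ≠ 5))
  PySem.Str.join " " (PySem.Str.split₀ n4)

-- the normalized comparison key of an entry
def pvKey (r : List (String × String)) : String := pvNormKey (pvDGet r "location")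

-- ===== PORT A =====
def dedupe_consecutive_locations_py (route_inputs : List (List (String × String))) : List (List (String × String)) :=
  route_inputs.foldl (fun deduped route_input =>
    match deduped.getLast? with
    | some last =>
        if pvNormKey (pvDGet last "location") == pvNormKey (pvDGet route_input "location") then
          if pvDGet route_input "kind" == "destination" then
            deduped.dropLast ++ [pvDSet (pvDSet last "kind" "destination") "name" (pvDGet route_input "name")]
          else deduped
        else deduped ++ [route_input]
    | none => deduped ++ [route_input]) []

-- ===== PORT B =====
def dedupe_consecutive_locations_py_alt (route_inputs : List (List (String × String))) : List (List (String × String)) :=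
  if route_inputs.length < 2 then route_inputs else
  -- stage 1: runs of consecutive entries with equal normalized keys
  let groups := route_inputs.foldl
    (fun (groups : List (String × List (List (String × String)))) route_input =>
      let key := pvNormKey (pvDGet route_input "location")
      match groups.getLast? with
      | some last =>
          if last.1 == key then groups.dropLast ++ [(last.1, last.2 ++ [route_input])]
          else groups ++ [(key, [route_input])]
      | none => groups ++ [(key, [route_input])]) []
  -- stage 2: collapse each run onto its first entry; last destination of the run wins
  groups.foldl (fun result g =>
    let kept := g.2.headD []
    let lastDestName := (g.2.drop 1).foldl
      (fun acc extra => if pvDGet extra "kind" == "destination" then some (pvDGet extra "name") else acc)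
      none
    let kept' := match lastDestName with
      | some n => pvDSet (pvDSet kept "kind" "destination") "name" n
      | none => kept
    result ++ [kept']) []

-- ===== PRECONDITION & SPEC =====
-- Pre_ excludes exactly the inputs on which the Python programs raise KeyError: with two or more
-- entries, an entry without a "location" key, or an entry that duplicates its predecessor's
-- normalized location but lacks the "kind" key (or lacks "name" while its kind is "destination").
def Pre_dedupe_consecutive_locations_py (route_inputs : List (List (String × String))) : Prop :=
  route_inputs.length ≤ 1 ∨
  ((∀ r ∈ route_inputs, (PySem.Dict.mk r).contains "location" = true) ∧
  (∀ p ∈ route_inputs.zip (route_inputs.drop 1), pvKey p.2 = pvKey p.1 →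
      (PySem.Dict.mk p.2).contains "kind" = true ∧
      ((PySem.Dict.mk p.2).getD "kind" "" = "destination" →
        (PySem.Dict.mk p.2).contains "name" = true)))
instance (route_inputs : List (List (String × String))) : Decidable (Pre_dedupe_consecutive_locations_py route_inputs) := by
  unfold Pre_dedupe_consecutive_locations_py; infer_instance

def pvWitness_dedupe_consecutive_locations_py : (List (List (String × String))) :=
  [[("location", "a"), ("kind", "origin"), ("name", "b")]]

def Spec_dedupe_consecutive_locations_py (route_inputs : List (List (String × String))) (out : List (List (String × String))) : Prop := out = dedupe_consecutive_locations_py_alt route_inputs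
instance (route_inputs : List (List (String × String))) (out : List (List (String × String))) : Decidable (Spec_dedupe_consecutive_locations_py route_inputs out) := by unfold Spec_dedupe_consecutive_locations_py; infer_instance

-- ===== CLAIM (what is proved, stated in full; the proofs are below) =====
def Claim_equal_dedupe_consecutive_locations_py : Prop := ∀ (route_inputs : List (List (String × String))), Dom_dedupe_consecutive_locations_py route_inputs → Pre_dedupe_consecutive_locations_py route_inputs → Spec_dedupe_consecutive_locations_py route_inputs (dedupe_consecutive_locations_py route_inputs)

-- ===== LEMMAS AND PROOFS =====

-- the duplicate-merging update step of A
def pvUpd (kept r : List (String × String)) : List (String × String) :=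
  if pvDGet r "kind" == "destination" then
    pvDSet (pvDSet kept "kind" "destination") "name" (pvDGet r "name")
  else kept

-- A's loop body, named
def pvStepA (deduped : List (List (String × String))) (route_input : List (String × String)) : List (List (String × String)) :=
  match deduped.getLast? with
  | some last =>
      if pvNormKey (pvDGet last "location") == pvNormKey (pvDGet route_input "location") then
        if pvDGet route_input "kind" == "destination" then
          deduped.dropLast ++ [pvDSet (pvDSet last "kind" "destination") "name" (pvDGet route_input "name")]
        else deduped
      else deduped ++ [route_input]
  | none => deduped ++ [route_input]

-- B's stage-1 loop body, named
def pvGroupStep (groups : List (String × List (List (String × String)))) (route_input : List (String × String)) : List (String × List (List (String × String))) :=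
  let key := pvNormKey (pvDGet route_input "location")
  match groups.getLast? with
  | some last =>
      if last.1 == key then groups.dropLast ++ [(last.1, last.2 ++ [route_input])]
      else groups ++ [(key, [route_input])]
  | none => groups ++ [(key, [route_input])]

-- B's last-destination accumulator, named
def pvLD (acc : Option String) (extra : List (String × String)) : Option String :=
  if pvDGet extra "kind" == "destination" then some (pvDGet extra "name") else acc

-- applying a last-destination result to the kept entry
def pvApply (kept : List (String × String)) : Option String → List (String × String)
  | some n => pvDSet (pvDSet kept "kind" "destination") "name" n
  | none => kept

-- B's stage-2 per-run merge, named
def pvMergeRun (g : String × List (List (String × String))) : List (String × String) :=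
  pvApply (g.2.headD []) ((g.2.drop 1).foldl pvLD none)

-- the longest prefix of l whose every entry has key k, and the remainder
def pvTakeRun (k : String) : List (List (String × String)) → List (List (String × String)) × List (List (String × String))
  | [] => ([], [])
  | r :: rest =>
      if pvKey r == k then
        let p := pvTakeRun k rest; (r :: p.1, p.2)
      else ([], r :: rest)

theorem pvTakeRun_snd_length (k : String) (l : List (List (String × String))) :
    (pvTakeRun k l).2.length ≤ l.length := by
  induction l with
  | nil => simp [pvTakeRun]
  | cons r rest ih =>
      simp only [pvTakeRun]
      split
      · exact le_trans ih (Nat.le_succ _)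
      · exact le_refl _

-- the runs of consecutive equal-key entries, with their keys
def pvGK : List (List (String × String)) → List (String × List (List (String × String)))
  | [] => []
  | r :: rest =>
      let p := pvTakeRun (pvKey r) rest
      (pvKey r, r :: p.1) :: pvGK p.2
termination_by l => l.length
decreasing_by
  exact Nat.lt_succ_of_le (pvTakeRun_snd_length _ _)

theorem pvDGet_pvDSet_ne (d : List (String × String)) (k v k' : String) (h : k' ≠ k) :
    pvDGet (pvDSet d k v) k' = pvDGet d k' :=
  PySem.Dict.getD_insert_of_ne (PySem.Dict.mk d) v "" h

theorem pvKey_pvUpd (kept r : List (String × String)) : pvKey (pvUpd kept r) = pvKey kept := by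
  unfold pvKey pvUpd
  split
  · rw [pvDGet_pvDSet_ne _ _ _ _ (by decide), pvDGet_pvDSet_ne _ _ _ _ (by decide)]
  · rfl

-- re-inserting a key whose every occurrence already carries the value is the identity
theorem pvInsert_eq_self {κ ν : Type} [BEq κ] [LawfulBEq κ] (d : PySem.Dict κ ν) (k : κ) (v : ν)
    (hc : d.contains k = true) (h : ∀ p ∈ d.items, p.1 = k → p.2 = v) : d.insert k v = d := by
  apply PySem.Dict.ext
  rw [PySem.Dict.items_insert_of_contains d v hc]
  have : ∀ p ∈ d.items, (if p.1 == k then (k, v) else p) = p := by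
    intro p hp
    by_cases hk : p.1 = k
    · simp only [hk, BEq.rfl, if_true]
      exact Prod.ext hk.symm (h p hp hk).symm
    · simp [hk]
  calc d.items.map (fun p => if p.1 == k then (k, v) else p)
      = d.items.map id := List.map_congr_left this
    _ = d.items := List.map_id d.items

-- the two-destination collapse: a second kind/name update overwrites the first
theorem pvDSet_collapse (kept : List (String × String)) (m n : String) :
    pvDSet (pvDSet (pvDSet (pvDSet kept "kind" "destination") "name" m) "kind" "destination") "name" n
      = pvDSet (pvDSet kept "kind" "destination") "name" n := by
  show ((PySem.Dict.mk (((((PySem.Dict.mk kept).insert "kind" "destination").insert "name" m)).items)).insert "kind" "destination" |>.insert "name" n).items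
      = (((PySem.Dict.mk kept).insert "kind" "destination").insert "name" n).items
  have hmk : ∀ (d : PySem.Dict String String), PySem.Dict.mk d.items = d := fun d => rfl
  rw [hmk]
  have h1 : (((PySem.Dict.mk kept).insert "kind" "destination").insert "name" m).insert "kind" "destination"
      = ((PySem.Dict.mk kept).insert "kind" "destination").insert "name" m := by
    apply pvInsert_eq_self
    · rw [PySem.Dict.contains_insert]
      simp [PySem.Dict.contains_insert_self]
    · intro p hp hk
      rcases (PySem.Dict.mem_items_insert _ _ _ _).mp hp with h | ⟨hp2, _⟩
      · rw [h] at hk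
        have hk' : "name" = "kind" := hk
        exact absurd hk' (by decide)
      · rcases (PySem.Dict.mem_items_insert _ _ _ _).mp hp2 with h | ⟨_, hne⟩
        · rw [h]
        · exact absurd hk hne
  rw [h1, PySem.Dict.insert_insert_self]

-- folding A's merge step over a run equals applying the run's last destination once
theorem pvFoldUpd_eq_apply (g : List (List (String × String))) :
    ∀ (kept : List (String × String)) (o : Option String),
      g.foldl pvUpd (pvApply kept o) = pvApply kept (g.foldl pvLD o) := by
  induction g with
  | nil => intro kept o; rfl
  | cons e rest ih =>
      intro kept o
      rw [List.foldl_cons, List.foldl_cons]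
      have hstep : pvUpd (pvApply kept o) e = pvApply kept (pvLD o e) := by
        unfold pvUpd pvLD
        by_cases hd : (pvDGet e "kind" == "destination") = true
        · rw [if_pos hd, if_pos hd]
          cases o with
          | none => rfl
          | some m => exact pvDSet_collapse kept m (pvDGet e "name")
        · rw [if_neg hd, if_neg hd]
      rw [hstep]
      exact ih (kept) (pvLD o e)

theorem pvMergeRun_run (k : String) (r : List (String × String)) (g : List (List (String × String))) :
    pvMergeRun (k, r :: g) = g.foldl pvUpd r := by
  unfold pvMergeRun
  simp only [List.headD_cons, List.drop_one, List.tail_cons]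
  exact (pvFoldUpd_eq_apply g r none).symm

-- A's step on a nonempty accumulator
theorem pvStepA_concat (acc : List (List (String × String))) (kept r : List (String × String)) :
    pvStepA (acc ++ [kept]) r =
      if pvKey kept == pvKey r then acc ++ [pvUpd kept r] else (acc ++ [kept]) ++ [r] := by
  unfold pvStepA pvKey pvUpd
  rw [List.getLast?_concat]
  dsimp only
  by_cases h1 : (pvNormKey (pvDGet kept "location") == pvNormKey (pvDGet r "location")) = true
  · rw [if_pos h1, if_pos h1]
    by_cases h2 : (pvDGet r "kind" == "destination") = true
    · rw [if_pos h2, if_pos h2, List.dropLast_concat]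
    · rw [if_neg h2, if_neg h2]
  · rw [if_neg h1, if_neg h1]

-- B's stage-1 step on a nonempty accumulator
theorem pvGroupStep_concat (acc : List (String × List (List (String × String))))
    (k : String) (run : List (List (String × String))) (r : List (String × String)) :
    pvGroupStep (acc ++ [(k, run)]) r =
      if k == pvKey r then acc ++ [(k, run ++ [r])] else (acc ++ [(k, run)]) ++ [(pvKey r, [r])] := by
  unfold pvGroupStep pvKey
  rw [List.getLast?_concat]
  dsimp only
  by_cases h : (k == pvNormKey (pvDGet r "location")) = true
  · rw [if_pos h, if_pos h, List.dropLast_concat]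
  · rw [if_neg h, if_neg h]

-- stage 1 computes exactly the runs pvGK describes
theorem pvStage1_eq (l : List (List (String × String))) :
    ∀ (acc : List (String × List (List (String × String)))) (k : String) (run : List (List (String × String))),
      l.foldl pvGroupStep (acc ++ [(k, run)]) =
        acc ++ (k, run ++ (pvTakeRun k l).1) :: pvGK (pvTakeRun k l).2 := by
  induction l with
  | nil => intro acc k run; simp [pvTakeRun, pvGK]
  | cons r rest ih =>
      intro acc k run
      rw [List.foldl_cons, pvGroupStep_concat]
      by_cases h : k = pvKey r
      · rw [if_pos (beq_iff_eq.mpr h)]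
        rw [ih acc k (run ++ [r])]
        have ht : pvTakeRun k (r :: rest) = (r :: (pvTakeRun k rest).1, (pvTakeRun k rest).2) := by
          simp [pvTakeRun, beq_iff_eq.mpr h.symm]
        rw [ht]
        simp
      · rw [if_neg (fun hc => h (beq_iff_eq.mp hc))]
        rw [ih (acc ++ [(k, run)]) (pvKey r) [r]]
        have hg : (pvKey r == k) = false := beq_eq_false_iff_ne.mpr (fun hc => h hc.symm)
        have ht : pvTakeRun k (r :: rest) = ([], r :: rest) := by
          simp [pvTakeRun, hg]
        rw [ht]
        rw [show pvGK (r :: rest) = (pvKey r, r :: (pvTakeRun (pvKey r) rest).1) :: pvGK (pvTakeRun (pvKey r) rest).2 from by rw [pvGK]]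
        simp

-- stage 2 is a map over the runs
theorem pvStage2_eq (l : List (String × List (List (String × String))))
    (acc : List (List (String × String))) :
    l.foldl (fun result g => result ++ [pvMergeRun g]) acc = acc ++ l.map pvMergeRun := by
  induction l generalizing acc with
  | nil => simp
  | cons g rest ih => rw [List.foldl_cons, ih]; simp

-- A's fold over the rest of the list, given a last kept entry
theorem pvHMain (N : Nat) : ∀ (l : List (List (String × String))), l.length ≤ N →
    ∀ (acc : List (List (String × String))) (kept : List (String × String)),
      l.foldl pvStepA (acc ++ [kept]) =
        acc ++ (pvTakeRun (pvKey kept) l).1.foldl pvUpd kept ::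
          (pvGK (pvTakeRun (pvKey kept) l).2).map pvMergeRun := by
  induction N with
  | zero =>
      intro l hl acc kept
      rw [List.length_eq_zero_iff.mp (Nat.le_zero.mp hl)]
      simp [pvTakeRun, pvGK]
  | succ N ih =>
      intro l hl acc kept
      cases l with
      | nil => simp [pvTakeRun, pvGK]
      | cons r rest =>
          rw [List.foldl_cons, pvStepA_concat]
          by_cases h : pvKey kept = pvKey r
          · rw [if_pos (beq_iff_eq.mpr h)]
            rw [ih rest (Nat.le_of_succ_le_succ hl) acc (pvUpd kept r)]
            have ht : pvTakeRun (pvKey kept) (r :: rest)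
                = (r :: (pvTakeRun (pvKey kept) rest).1, (pvTakeRun (pvKey kept) rest).2) := by
              simp [pvTakeRun, beq_iff_eq.mpr h.symm]
            rw [ht, pvKey_pvUpd]
            simp
          · rw [if_neg (fun hc => h (beq_iff_eq.mp hc))]
            rw [ih rest (Nat.le_of_succ_le_succ hl) (acc ++ [kept]) r]
            have hg : (pvKey r == pvKey kept) = false := beq_eq_false_iff_ne.mpr (fun hc => h hc.symm)
            have ht : pvTakeRun (pvKey kept) (r :: rest) = ([], r :: rest) := by
              simp [pvTakeRun, hg]
            rw [ht]
            rw [show pvGK (r :: rest) = (pvKey r, r :: (pvTakeRun (pvKey r) rest).1) :: pvGK (pvTakeRun (pvKey r) rest).2 from by rw [pvGK]]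
            simp [pvMergeRun_run]

-- ===== VERDICT (by name: the statement is the Claim_ definition above) =====
theorem dedupe_consecutive_locations_py_spec : Claim_equal_dedupe_consecutive_locations_py := by
  intro routes _ _
  unfold Spec_dedupe_consecutive_locations_py
  show dedupe_consecutive_locations_py routes = dedupe_consecutive_locations_py_alt routes
  match routes with
  | [] => rfl
  | [h] => rfl
  | h :: h' :: t =>
      show (h :: h' :: t).foldl pvStepA [] = dedupe_consecutive_locations_py_alt (h :: h' :: t)
      unfold dedupe_consecutive_locations_py_alt
      rw [if_neg (by simp)]
      show (h :: h' :: t).foldl pvStepA [] =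
        ((h :: h' :: t).foldl pvGroupStep []).foldl (fun result g => result ++ [pvMergeRun g]) []
      have hA1 : pvStepA [] h = [] ++ [h] := rfl
      have hB1 : pvGroupStep [] h = [] ++ [(pvKey h, [h])] := rfl
      conv_lhs => rw [List.foldl_cons, hA1]
      conv_rhs => rw [List.foldl_cons, hB1]
      rw [pvHMain (h' :: t).length (h' :: t) (le_refl _) [] h,
          pvStage1_eq (h' :: t) [] (pvKey h) [h],
          pvStage2_eq]
      simp [pvMergeRun_run]
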